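-- pv_equiv track=rewrite | github.com/KarolWes/Convolutional_Coding | main.py | crc_encoder
-- ===== SOURCE A (Python) =====
-- def vec_to_poly(vec: []):
--     return [i for i, bit in enumerate(vec) if bit == 1]
--
-- def bitmask(vec: [], size: int):
--     ans = [0] * size
--     for el in vec:
--         ans[el] ^= 1
--     return ans
--
-- def zeros_refill_to_const(u: [], l: int):
--     if len(u) < l:
--         u += [0] * (l - len(u))
--     elif len(u) > l:
--         raise Exception("operation impossible to complete")
--     return u
--
-- def crc_encoder(u: [], generator: [list], ):
--     u_d = vec_to_poly(u)
--     v = []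
--     for gen in generator:
--         maxi = 0
--         gen = vec_to_poly(gen)
--         tmp = []
--         for el in u_d:
--             for delay in gen:
--                 val = el + delay
--                 maxi = max(val, maxi)
--                 tmp.append(val)
--         v.append(bitmask(tmp, maxi + 1))
--     return [zeros_refill_to_const(v_el, 2 * len(u)) for v_el in v]
-- ===== SOURCE B (Python) =====
-- def crc_encoder(u: [], generator: [list], ):
--     n = len(u)
--     # pack u into one arbitrary-precision integer bitset (bit i set iff u[i] == 1)
--     U = 0
--     for i in range(n):
--         if u[i] == 1:
--             U |= 1 << i
--     out = []
--     for gen in generator: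
--         # carry-less (GF(2)) multiplication: XOR shifted copies of U
--         p = 0
--         x = U
--         for bit in gen:
--             if bit == 1:
--                 p ^= x
--             x <<= 1
--         length = p.bit_length() or 1
--         if length > 2 * n:
--             raise Exception("operation impossible to complete")
--         out.append([(p >> k) & 1 for k in range(length)] + [0] * (2 * n - length))
--     return out
-- ===== Notes on version B (the rewrite author's own statement) =====
-- stated objective: alternative
-- what changed: Replaces A's sparse position-list arithmetic (enumerate indices of ones, append every pair sum while tracking a running max, then scatter-xor into a bitmask list) by packing each vector into one arbitrary-precision integer bitset and computing the GF(2) product as a carry-less multiplication (XOR of shifted copies), reading the result back with bit_length and shifts.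
import Mathlib
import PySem

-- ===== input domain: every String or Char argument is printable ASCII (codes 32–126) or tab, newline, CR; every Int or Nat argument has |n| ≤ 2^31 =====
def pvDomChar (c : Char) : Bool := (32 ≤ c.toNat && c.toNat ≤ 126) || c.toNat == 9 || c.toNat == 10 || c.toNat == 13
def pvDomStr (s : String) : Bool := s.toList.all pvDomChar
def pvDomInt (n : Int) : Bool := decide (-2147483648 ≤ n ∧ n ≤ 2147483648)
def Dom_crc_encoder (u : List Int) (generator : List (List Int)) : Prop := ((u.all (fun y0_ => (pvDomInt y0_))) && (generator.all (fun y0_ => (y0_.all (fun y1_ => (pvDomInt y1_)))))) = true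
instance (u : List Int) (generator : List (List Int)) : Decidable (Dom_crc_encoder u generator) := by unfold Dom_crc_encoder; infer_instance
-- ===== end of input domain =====

-- B replaces A's sparse position-list arithmetic by an integer-bitset carry-less
-- multiplication (XOR of shifted copies), reading the result off with shifts
-- (alternative algorithm/data structure, similar cost).


-- ===== PORT A =====
def vec_to_poly (vec : List Int) : List Int :=
  ((PySem.List.enumerate vec 0).filter (fun p => p.2 == 1)).map (fun p => p.1)

def bitmask (vec : List Int) (size : Int) : List Int :=
  vec.foldl
    (fun ans el =>
      PySem.List.pySetD ans el (PySem.Int.bxor (PySem.List.pyGetD ans el 0) 1))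
    (List.replicate size.toNat 0)

def zeros_refill_to_const (u : List Int) (l : Int) : List Int :=
  if PySem.List.len u < l then u ++ List.replicate (l - PySem.List.len u).toNat 0
  else u  -- when len u > l Python raises (excluded by Pre_); when len u = l it returns u

def crc_encoder (u : List Int) (generator : List (List Int)) : List (List Int) :=
  let u_d := vec_to_poly u
  let v := generator.foldl
    (fun v gen =>
      let genp := vec_to_poly gen
      let st := u_d.foldl
        (fun (st : Int × List Int) el =>
          genp.foldl
            (fun (st2 : Int × List Int) delay =>
              (max (el + delay) st2.1, st2.2 ++ [el + delay]))
            st)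
        ((0 : Int), ([] : List Int))
      v ++ [bitmask st.2 (st.1 + 1)])
    []
  v.map (fun v_el => zeros_refill_to_const v_el (2 * PySem.List.len u))

-- ===== PORT B =====
def crc_encoder_alt (u : List Int) (generator : List (List Int)) : List (List Int) :=
  let n := u.length
  -- pack u into one integer bitset: bit i set iff u[i] == 1
  let U := (List.range n).foldl (fun U i => if u.getD i 0 == 1 then U ||| (1 <<< i) else U) 0
  generator.foldl
    (fun out gen =>
      -- carry-less (GF(2)) multiplication: XOR shifted copies of U
      let st := gen.foldl
        (fun (st : Nat × Nat) (bit : Int) => (if bit == 1 then st.1 ^^^ st.2 else st.1, st.2 <<< 1))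
        ((0 : Nat), U)
      let p := st.1
      let length := if p.size = 0 then 1 else p.size  -- p.bit_length() or 1
      let bits := (List.range length).map (fun k => (((p >>> k) &&& 1 : Nat) : Int))
      -- when length > 2*n Python raises (excluded by Pre_)
      out ++ [if length > 2 * n then bits else bits ++ List.replicate (2 * n - length) 0])
    []

-- ===== PRECONDITION & SPEC =====
-- Pre_ excludes exactly the inputs on which A raises "operation impossible to complete":
-- some generator's product polynomial would be longer than 2*len(u).
def Pre_crc_encoder (u : List Int) (generator : List (List Int)) : Prop :=
  ∀ gen ∈ generator, u ≠ [] ∧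
    ∀ i < u.length, ∀ j < gen.length,
      u.getD i 0 = 1 → gen.getD j 0 = 1 → i + j + 1 ≤ 2 * u.length
instance (u : List Int) (generator : List (List Int)) : Decidable (Pre_crc_encoder u generator) := by
  unfold Pre_crc_encoder; infer_instance

def pvWitness_crc_encoder : List Int × List (List Int) := ([1, 0], [[1], [1, 1]])

def Spec_crc_encoder (u : List Int) (generator : List (List Int)) (out : List (List Int)) : Prop := out = crc_encoder_alt u generator
instance (u : List Int) (generator : List (List Int)) (out : List (List Int)) : Decidable (Spec_crc_encoder u generator out) := by unfold Spec_crc_encoder; infer_instance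

-- ===== CLAIM (what is proved, stated in full; the proofs are below) =====
def Claim_equal_crc_encoder : Prop := ∀ (u : List Int) (generator : List (List Int)), Dom_crc_encoder u generator → Pre_crc_encoder u generator → Spec_crc_encoder u generator (crc_encoder u generator)

-- ===== LEMMAS AND PROOFS =====

-- A's per-generator polynomial (before zero-padding)
def aGen (u g : List Int) : List Int :=
  let st := (vec_to_poly u).foldl
    (fun (st : Int × List Int) el =>
      (vec_to_poly g).foldl
        (fun (st2 : Int × List Int) delay =>
          (max (el + delay) st2.1, st2.2 ++ [el + delay]))
        st)
    ((0 : Int), ([] : List Int))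
  bitmask st.2 (st.1 + 1)

-- B's bitset of u and per-generator product integer
def Uof (u : List Int) : Nat :=
  (List.range u.length).foldl (fun U i => if u.getD i 0 == 1 then U ||| (1 <<< i) else U) 0

def pInt (U : Nat) (g : List Int) : Nat :=
  (g.foldl (fun (st : Nat × Nat) (bit : Int) => (if bit == 1 then st.1 ^^^ st.2 else st.1, st.2 <<< 1))
    ((0 : Nat), U)).1

-- B's per-generator polynomial (before zero-padding)
def bBits (u g : List Int) : List Int :=
  (List.range (if (pInt (Uof u) g).size = 0 then 1 else (pInt (Uof u) g).size)).map
    (fun k => (((pInt (Uof u) g >>> k) &&& 1 : Nat) : Int))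

-- B's per-generator padded output
def bGen (u g : List Int) : List Int :=
  if (if (pInt (Uof u) g).size = 0 then 1 else (pInt (Uof u) g).size) > 2 * u.length
  then bBits u g
  else bBits u g ++
    List.replicate (2 * u.length - (if (pInt (Uof u) g).size = 0 then 1 else (pInt (Uof u) g).size)) 0

-- indices (as naturals) where the vector holds 1
def polyN (xs : List Int) : List Nat :=
  (List.range xs.length).filter (fun i => xs.getD i 0 == 1)

-- all pair sums, in loop order
def sums (u g : List Int) : List Nat :=
  (polyN u).flatMap (fun i => (polyN g).map (fun j => i + j))

-- flip entry k
def flipN (ans : List Int) (k : Nat) : List Int :=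
  ans.set k (PySem.Int.bxor (ans.getD k 0) 1)

theorem length_flipfold (ks : List Nat) : ∀ ans : List Int,
    (ks.foldl flipN ans).length = ans.length := by
  induction ks with
  | nil => intro ans; rfl
  | cons j rest ih => intro ans; simp [List.foldl_cons, ih, flipN]

theorem getD_set_eq (ans : List Int) (k : Nat) (v : Int) (hk : k < ans.length) :
    (ans.set k v).getD k 0 = v := by
  simp [List.getD_eq_getElem?_getD, hk]

theorem getD_set_ne (ans : List Int) (j k : Nat) (v : Int) (h : j ≠ k) :
    (ans.set j v).getD k 0 = ans.getD k 0 := by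
  simp [List.getD_eq_getElem?_getD, h]

def zoList (ans : List Int) : Prop := ∀ i : Nat, ans.getD i 0 = 0 ∨ ans.getD i 0 = 1

theorem zo_flipN (ans : List Int) (j : Nat) (h : zoList ans) : zoList (flipN ans j) := by
  intro i
  by_cases hij : j = i
  · subst hij
    by_cases hlen : j < ans.length
    · rw [flipN, getD_set_eq ans j _ hlen]
      rcases h j with h0 | h0 <;> rw [h0]
      · right; decide
      · left; decide
    · rw [flipN, List.set_eq_of_length_le (by omega)]; exact h j
  · rw [flipN, getD_set_ne ans j i _ hij]; exact h i

theorem getD_replicate_zero (s : Nat) (i : Nat) :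
    (List.replicate s (0 : Int)).getD i 0 = 0 := by
  simp only [List.getD_eq_getElem?_getD, List.getElem?_replicate]
  split <;> rfl

theorem zo_replicate (s : Nat) : zoList (List.replicate s (0 : Int)) :=
  fun i => Or.inl (getD_replicate_zero s i)

theorem getD_flipfold (ks : List Nat) : ∀ ans : List Int, zoList ans →
    (∀ j ∈ ks, j < ans.length) → ∀ k, k < ans.length →
    (ks.foldl flipN ans).getD k 0
      = PySem.Int.bxor (ans.getD k 0) ((ks.count k % 2 : Nat) : Int) := by
  induction ks with
  | nil =>
    intro ans _ _ k _
    simp [PySem.Int.bxor_zero]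
  | cons j rest ih =>
    intro ans h01 hks k hk
    have hlen : (flipN ans j).length = ans.length := by simp [flipN]
    rw [List.foldl_cons,
      ih (flipN ans j) (zo_flipN ans j h01)
        (fun j' hj' => by rw [hlen]; exact hks j' (List.mem_cons_of_mem _ hj'))
        k (by rw [hlen]; exact hk)]
    by_cases hjk : j = k
    · subst hjk
      rw [flipN, getD_set_eq ans j _ (hks j (List.mem_cons_self)), List.count_cons_self]
      rcases h01 j with hg | hg <;> rw [hg] <;>
        rcases Nat.even_or_odd (rest.count j) with hc | hc
      · rw [Nat.even_iff] at hc
        rw [hc, show (rest.count j + 1) % 2 = 1 from by omega]; decide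
      · rw [Nat.odd_iff] at hc
        rw [hc, show (rest.count j + 1) % 2 = 0 from by omega]; decide
      · rw [Nat.even_iff] at hc
        rw [hc, show (rest.count j + 1) % 2 = 1 from by omega]; decide
      · rw [Nat.odd_iff] at hc
        rw [hc, show (rest.count j + 1) % 2 = 0 from by omega]; decide
    · rw [flipN, getD_set_ne ans j k _ hjk]
      simp [hjk]

-- vec_to_poly with a general enumerate start
theorem enum_poly (xs : List Int) : ∀ s : Int,
    ((PySem.List.enumerate xs s).filter (fun p => p.2 == 1)).map (fun p => p.1)
      = ((List.range xs.length).filter (fun i => xs.getD i 0 == 1)).map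
          (fun i : Nat => s + (i : Int)) := by
  induction xs with
  | nil => intro s; simp [PySem.List.enumerate_nil]
  | cons x rest ih =>
    intro s
    rw [PySem.List.enumerate_cons, List.length_cons, List.range_succ_eq_map,
      List.filter_cons, List.filter_cons, List.filter_map, List.getD_cons_zero]
    have hsucc : List.filter ((fun i => (x :: rest).getD i 0 == 1) ∘ Nat.succ)
        (List.range rest.length)
        = List.filter (fun i => rest.getD i 0 == 1) (List.range rest.length) :=
      List.filter_congr (fun i _ => by simp)
    have htail :
        (((PySem.List.enumerate rest (s + 1)).filter (fun p => p.2 == 1)).map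
            (fun p => p.1))
          = (List.map Nat.succ
              (List.filter ((fun i => (x :: rest).getD i 0 == 1) ∘ Nat.succ)
                (List.range rest.length))).map (fun i : Nat => s + (i : Int)) := by
      rw [hsucc, ih (s + 1), List.map_map]
      exact List.map_congr_left (fun i _ => by
        simp only [Function.comp_apply]; omega)
    by_cases hb : (x == 1) = true
    · rw [if_pos hb, if_pos hb, List.map_cons, List.map_cons, htail]
      congr 1
      omega
    · rw [if_neg hb, if_neg hb, htail]

theorem vec_to_poly_eq (xs : List Int) :
    vec_to_poly xs = (polyN xs).map (fun i : Nat => (i : Int)) := by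
  rw [vec_to_poly, enum_poly xs 0, polyN]
  exact List.map_congr_left (fun i _ => by omega)

-- A's inner (el-fixed) fold
theorem inner_fold_eq (gp : List Int) (el : Int) : ∀ (m0 : Int) (t0 : List Int),
    gp.foldl
      (fun (st2 : Int × List Int) delay =>
        (max (el + delay) st2.1, st2.2 ++ [el + delay])) (m0, t0)
      = ((gp.map (fun d => el + d)).foldl (fun m v => max v m) m0,
         t0 ++ gp.map (fun d => el + d)) := by
  induction gp with
  | nil => intro m0 t0; simp
  | cons d rest ih => intro m0 t0; simp [ih, List.append_assoc]

theorem pair_fold_eq (gp : List Int) : ∀ (ud : List Int) (m0 : Int) (t0 : List Int),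
    ud.foldl
      (fun (st : Int × List Int) el =>
        gp.foldl
          (fun (st2 : Int × List Int) delay =>
            (max (el + delay) st2.1, st2.2 ++ [el + delay])) st) (m0, t0)
      = ((ud.flatMap (fun el => gp.map (fun d => el + d))).foldl (fun m v => max v m) m0,
         t0 ++ ud.flatMap (fun el => gp.map (fun d => el + d))) := by
  intro ud
  induction ud with
  | nil => intro m0 t0; simp
  | cons el rest ih =>
    intro m0 t0
    rw [List.foldl_cons, inner_fold_eq, ih, List.flatMap_cons, List.foldl_append,
      List.append_assoc]

theorem sums_cast (u g : List Int) :
    (vec_to_poly u).flatMap (fun el => (vec_to_poly g).map (fun d => el + d))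
      = (sums u g).map (fun k : Nat => (k : Int)) := by
  rw [vec_to_poly_eq u, vec_to_poly_eq g, sums]
  induction (polyN u) with
  | nil => simp
  | cons i rest ih =>
    rw [List.map_cons, List.flatMap_cons, List.flatMap_cons, List.map_append, ih]
    congr 1
    rw [List.map_map, List.map_map]
    exact List.map_congr_left (fun j _ => by simp only [Function.comp_apply]; omega)

theorem bitmask_cast (ks : List Nat) (s : Int) :
    bitmask (ks.map (fun k : Nat => (k : Int))) s
      = ks.foldl flipN (List.replicate s.toNat 0) := by
  rw [bitmask, List.foldl_map]
  exact PySem.List.foldl_congr_mem _ _ _ _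
    (fun acc k _ => by
      simp [flipN, PySem.List.pySetD_natCast, PySem.List.pyGetD_natCast])

-- ===== B-side: bit-level characterisation of the carry-less product =====

theorem testBit_one_shift (i k : Nat) : (1 <<< i).testBit k = decide (i = k) := by
  rw [Nat.shiftLeft_eq, one_mul, Nat.testBit_two_pow]

-- the running XOR of shifted copies of x along the generator's bits
def xsh : List Int → Nat → Nat
  | [], _ => 0
  | b :: rest, x => (if b == 1 then x else 0) ^^^ xsh rest (x <<< 1)

theorem fold_pair (g : List Int) : ∀ (p0 x : Nat),
    (g.foldl (fun (st : Nat × Nat) (bit : Int) =>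
        (if bit == 1 then st.1 ^^^ st.2 else st.1, st.2 <<< 1)) (p0, x)).1
      = p0 ^^^ xsh g x := by
  induction g with
  | nil => intro p0 x; simp [xsh]
  | cons b rest ih =>
    intro p0 x
    by_cases hb : (b == 1) = true
    · rw [List.foldl_cons, if_pos hb, ih, xsh, if_pos hb, Nat.xor_assoc]
    · rw [List.foldl_cons, if_neg hb, ih, xsh, if_neg hb, Nat.zero_xor]

theorem xsh_zero (g : List Int) : xsh g 0 = 0 := by
  induction g with
  | nil => rfl
  | cons b rest ih => simp [xsh, Nat.zero_shiftLeft, ih]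

theorem xsh_xor (g : List Int) : ∀ x y : Nat, xsh g (x ^^^ y) = xsh g x ^^^ xsh g y := by
  induction g with
  | nil => intro x y; simp [xsh]
  | cons b rest ih =>
    intro x y
    rw [xsh, xsh, xsh, Nat.shiftLeft_xor_distrib, ih]
    by_cases hb : (b == 1) = true <;>
      simp [hb, Nat.xor_assoc, Nat.xor_comm, Nat.xor_left_comm]

theorem xorFoldInit (f : Nat → Nat) (l : List Nat) : ∀ a : Nat,
    l.foldl (fun p j => p ^^^ f j) a = a ^^^ l.foldl (fun p j => p ^^^ f j) 0 := by
  induction l with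
  | nil => intro a; simp
  | cons j rest ih =>
    intro a
    rw [List.foldl_cons, List.foldl_cons, ih, ih (0 ^^^ f j)]
    simp [Nat.xor_assoc]

theorem polyN_cons (b : Int) (rest : List Int) :
    polyN (b :: rest) = (if b == 1 then [0] else []) ++ (polyN rest).map Nat.succ := by
  unfold polyN
  rw [List.length_cons, List.range_succ_eq_map, List.filter_cons, List.filter_map]
  have h : List.filter ((fun i => (b :: rest).getD i 0 == 1) ∘ Nat.succ)
      (List.range rest.length)
      = List.filter (fun i => rest.getD i 0 == 1) (List.range rest.length) :=
    List.filter_congr (fun i _ => by simp)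
  rw [h]
  by_cases hb : (b == 1) = true
  · rw [if_pos (by simpa using hb), if_pos hb]; rfl
  · rw [if_neg (by simpa using hb), if_neg hb]; rfl

theorem xsh_single (g : List Int) : ∀ i : Nat,
    xsh g (1 <<< i) = (polyN g).foldl (fun p j => p ^^^ 1 <<< (i + j)) 0 := by
  induction g with
  | nil => intro i; simp [xsh, polyN]
  | cons b rest ih =>
    intro i
    rw [xsh, ← Nat.shiftLeft_add 1 i 1, ih (i + 1), polyN_cons, List.foldl_append,
      List.foldl_map]
    have hf : (fun (p : Nat) (j : Nat) => p ^^^ 1 <<< (i + Nat.succ j))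
        = fun p j => p ^^^ 1 <<< (i + 1 + j) := by
      funext p j
      congr 2
      omega
    rw [hf]
    by_cases hb : (b == 1) = true
    · rw [if_pos hb, if_pos hb]
      rw [show List.foldl (fun p j => p ^^^ 1 <<< (i + j)) 0 [0] = 1 <<< i from by simp]
      rw [xorFoldInit (fun j => 1 <<< (i + 1 + j)) (polyN rest) (1 <<< i)]
    · rw [if_neg hb, if_neg hb]
      simp

theorem xsh_foldxor (g : List Int) (l : List Nat) : ∀ a : Nat,
    xsh g (l.foldl (fun a i => a ^^^ 1 <<< i) a)
      = l.foldl (fun acc i => acc ^^^ xsh g (1 <<< i)) (xsh g a) := by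
  induction l with
  | nil => intro a; rfl
  | cons i rest ih =>
    intro a
    rw [List.foldl_cons, List.foldl_cons, ih, xsh_xor]

theorem tb_orfold (l : List Nat) : ∀ (a : Nat) (k : Nat),
    ((l.foldl (fun a i => a ||| 1 <<< i) a).testBit k) = (a.testBit k || decide (k ∈ l)) := by
  induction l with
  | nil => intro a k; simp
  | cons i rest ih =>
    intro a k
    rw [List.foldl_cons, ih, Nat.testBit_or, testBit_one_shift]
    by_cases h : i = k <;> simp [h, List.mem_cons, eq_comm]

theorem tb_xorfold (ks : List Nat) : ∀ (a : Nat) (k : Nat),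
    ((ks.foldl (fun p s => p ^^^ 1 <<< s) a).testBit k)
      = ((a.testBit k).xor (decide (ks.count k % 2 = 1))) := by
  induction ks with
  | nil => intro a k; simp
  | cons s rest ih =>
    intro a k
    rw [List.foldl_cons, ih, Nat.testBit_xor, testBit_one_shift]
    by_cases h : s = k
    · subst h
      rw [List.count_cons_self]
      by_cases h2 : rest.count s % 2 = 1
      · rw [show (rest.count s + 1) % 2 = 0 from by omega]
        simp [h2]
      · rw [show (rest.count s + 1) % 2 = 1 from by omega]
        simp [h2]
    · simp [h]

theorem polyN_nodup (xs : List Int) : (polyN xs).Nodup :=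
  List.Nodup.filter _ (List.nodup_range)

theorem U_or_xor (u : List Int) :
    Uof u = (polyN u).foldl (fun a i => a ^^^ 1 <<< i) 0 := by
  apply Nat.eq_of_testBit_eq
  intro k
  rw [Uof, PySem.List.foldl_if_eq_foldl_filter,
    show (List.range u.length).filter (fun i => u.getD i 0 == 1) = polyN u from rfl,
    tb_orfold, tb_xorfold, Nat.zero_testBit, Bool.false_or, Bool.false_xor]
  by_cases hm : k ∈ polyN u
  · simp [hm, List.count_eq_one_of_mem (polyN_nodup u) hm]
  · simp [hm, List.count_eq_zero_of_not_mem hm]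

theorem pInt_eq (u g : List Int) :
    pInt (Uof u) g = (sums u g).foldl (fun p s => p ^^^ 1 <<< s) 0 := by
  rw [pInt, fold_pair, Nat.zero_xor, U_or_xor, xsh_foldxor, xsh_zero, sums,
    List.foldl_flatMap]
  have h1 : (fun (acc : Nat) (i : Nat) => acc ^^^ xsh g (1 <<< i))
      = fun acc i => ((polyN g).map (fun j => i + j)).foldl (fun p s => p ^^^ 1 <<< s) acc := by
    funext acc i
    rw [xsh_single]
    simp only [List.foldl_map]
    rw [xorFoldInit (fun j => 1 <<< (i + j)) (polyN g) acc]
  rw [h1]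

-- ordering facts for polyN
theorem polyN_pairwise (xs : List Int) : (polyN xs).Pairwise (· < ·) :=
  (List.pairwise_lt_range).filter _

-- entry values: shifted-and-masked bit equals the pair-sum count mod 2
theorem getElem_eq_getD (l : List Int) (i : Nat) (h : i < l.length) :
    l[i] = l.getD i 0 := by
  simp [List.getD_eq_getElem?_getD, List.getElem?_eq_getElem h]

-- the central equivalence of the two per-generator computations
theorem core (u g : List Int) : aGen u g = bBits u g := by
  have hP : pInt (Uof u) g = (sums u g).foldl (fun p s => p ^^^ 1 <<< s) 0 := pInt_eq u g
  rw [aGen, pair_fold_eq, sums_cast]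
  dsimp only
  rw [List.nil_append, bitmask_cast]
  by_cases hs : sums u g = []
  · simp only [bBits, hP, hs]
    decide
  · -- some pair of ones: the product polynomial reaches degree I + J
    have hune : polyN u ≠ [] := by
      intro h0; exact hs (by simp [sums, h0])
    have hgne : polyN g ≠ [] := by
      intro h0; exact hs (by simp [sums, h0])
    rcases List.eq_nil_or_concat' (polyN u) with h0 | ⟨pu', I, hu⟩
    · exact absurd h0 hune
    rcases List.eq_nil_or_concat' (polyN g) with h0 | ⟨pg', J, hg⟩
    · exact absurd h0 hgne
    have hu' : ∀ x ∈ pu', x < I := by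
      have hp := polyN_pairwise u
      rw [hu, List.pairwise_append] at hp
      exact fun x hx => hp.2.2 x hx I (List.mem_singleton.mpr rfl)
    have hg' : ∀ x ∈ pg', x < J := by
      have hp := polyN_pairwise g
      rw [hg, List.pairwise_append] at hp
      exact fun x hx => hp.2.2 x hx J (List.mem_singleton.mpr rfl)
    have huI : ∀ x ∈ polyN u, x ≤ I := by
      intro x hx
      rw [hu] at hx
      rcases List.mem_append.mp hx with h | h
      · exact Nat.le_of_lt (hu' x h)
      · rw [List.mem_singleton.mp h]
    have hgJ : ∀ x ∈ polyN g, x ≤ J := by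
      intro x hx
      rw [hg] at hx
      rcases List.mem_append.mp hx with h | h
      · exact Nat.le_of_lt (hg' x h)
      · rw [List.mem_singleton.mp h]
    have bound : ∀ v ∈ sums u g, v ≤ I + J := by
      intro v hv
      rw [sums, List.mem_flatMap] at hv
      obtain ⟨i, hi, hv⟩ := hv
      obtain ⟨j, hj, rfl⟩ := List.mem_map.mp hv
      exact Nat.add_le_add (huI i hi) (hgJ j hj)
    have hMmem : I + J ∈ sums u g := by
      rw [sums, List.mem_flatMap]
      refine ⟨I, ?_, List.mem_map.mpr ⟨J, ?_, rfl⟩⟩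
      · rw [hu]; exact List.mem_append_right _ (List.mem_singleton.mpr rfl)
      · rw [hg]; exact List.mem_append_right _ (List.mem_singleton.mpr rfl)
    have hcount : (sums u g).count (I + J) = 1 := by
      rw [sums, hu, List.flatMap_append, List.count_append,
        List.count_eq_zero.mpr (fun hmem => by
          rw [List.mem_flatMap] at hmem
          obtain ⟨i, hi, hmem⟩ := hmem
          obtain ⟨j, hj, hij⟩ := List.mem_map.mp hmem
          have h1 := hu' i hi
          have h2 := hgJ j hj
          omega)]
      simp only [List.flatMap_cons, List.flatMap_nil, List.append_nil]
      rw [hg, List.map_append, List.count_append,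
        List.count_eq_zero.mpr (fun hmem => by
          obtain ⟨j, hj, hij⟩ := List.mem_map.mp hmem
          have h2 := hg' j hj
          omega)]
      simp
    have hcount0 : ∀ k : Nat, I + J < k → (sums u g).count k = 0 := by
      intro k hk
      exact List.count_eq_zero.mpr (fun hmem => by have := bound k hmem; omega)
    -- the running maximum is I + J
    have hmaxi : (((sums u g).map (fun k : Nat => (k : Int))).foldl
        (fun m v => max v m) 0) = ((I + J : Nat) : Int) := by
      rw [PySem.List.foldl_congr_mem _ _ max _ (fun acc x _ => max_comm x acc)]
      apply le_antisymm
      · rcases PySem.List.foldl_max_mem ((sums u g).map (fun k : Nat => (k : Int))) 0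
          with h | h
        · rw [h]; exact Int.natCast_nonneg _
        · obtain ⟨v, hv, hveq⟩ := List.mem_map.mp h
          rw [← hveq]
          exact_mod_cast bound v hv
      · exact (PySem.List.le_foldl_max _ _).2 _
          (List.mem_map.mpr ⟨I + J, hMmem, rfl⟩)
    rw [hmaxi]
    have htoNat : (((I + J : Nat) : Int) + 1).toNat = I + J + 1 := by omega
    rw [htoNat]
    -- B's bit_length is I + J + 1
    have tbP : ∀ k, (pInt (Uof u) g).testBit k = decide ((sums u g).count k % 2 = 1) := by
      intro k
      rw [hP, tb_xorfold, Nat.zero_testBit, Bool.false_xor]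
    have hsize : (pInt (Uof u) g).size = I + J + 1 := by
      apply le_antisymm
      · exact Nat.size_le.mpr (Nat.lt_pow_two_of_testBit _ (fun j hj => by
          rw [tbP j, hcount0 j (by omega)]
          simp))
      · exact Nat.lt_size.mpr (Nat.ge_two_pow_of_testBit (by
          rw [tbP, hcount]
          simp))
    have hL : (if (pInt (Uof u) g).size = 0 then 1 else (pInt (Uof u) g).size)
        = I + J + 1 := by
      rw [hsize]
      simp
    have hksA : ∀ j ∈ sums u g, j < (List.replicate (I + J + 1) (0 : Int)).length := by
      intro j hj
      rw [List.length_replicate]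
      have := bound j hj
      omega
    apply List.ext_getElem
    · simp only [bBits]
      rw [length_flipfold, List.length_replicate, hL, List.length_map,
        List.length_range]
    · intro k h1 h2
      have hk : k < I + J + 1 := by
        rw [length_flipfold, List.length_replicate] at h1
        exact h1
      rw [getElem_eq_getD _ _ h1,
        getD_flipfold _ _ (zo_replicate _) hksA k (by rw [List.length_replicate]; omega),
        getD_replicate_zero, PySem.Int.bxor_comm, PySem.Int.bxor_zero]
      simp only [bBits, List.getElem_map, List.getElem_range]
      -- the masked shifted bit is the count's parity
      have ht : (pInt (Uof u) g).testBit k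
          = decide (pInt (Uof u) g / 2 ^ k % 2 = 1) :=
        Nat.testBit_eq_decide_div_mod_eq
      rw [tbP k] at ht
      have hand : (pInt (Uof u) g >>> k) &&& 1 = (sums u g).count k % 2 := by
        rw [Nat.and_one_is_mod, Nat.shiftRight_eq_div_pow]
        rw [decide_eq_decide] at ht
        omega
      rw [hand]

-- equality of the zero-padding steps, for any polynomial
theorem pad_eq (p : List Int) (n : Nat) :
    zeros_refill_to_const p (2 * (n : Int))
      = if p.length > 2 * n then p else p ++ List.replicate (2 * n - p.length) 0 := by
  rw [zeros_refill_to_const, PySem.List.len_eq]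
  rcases Nat.lt_trichotomy p.length (2 * n) with h | h | h
  · rw [if_pos (by exact_mod_cast h), if_neg (by omega)]
    congr 2
    omega
  · rw [if_neg (by omega), if_neg (by omega), h]
    simp
  · rw [if_neg (by exact_mod_cast by omega), if_pos (by omega)]

theorem bGen_eq (u g : List Int) :
    bGen u g = if (bBits u g).length > 2 * u.length then bBits u g
               else bBits u g ++ List.replicate (2 * u.length - (bBits u g).length) 0 := by
  simp only [bGen, bBits, List.length_map, List.length_range]

-- ===== VERDICT (by name: the statement is the Claim_ definition above) =====
theorem crc_encoder_spec : Claim_equal_crc_encoder := by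
  intro u generator _ _
  show crc_encoder u generator = crc_encoder_alt u generator
  show (generator.foldl (fun v gen => v ++ [aGen u gen]) []).map
      (fun v_el => zeros_refill_to_const v_el (2 * PySem.List.len u))
    = generator.foldl (fun out gen => out ++ [bGen u gen]) []
  rw [PySem.List.foldl_append_singleton_eq_map (f := fun gen => aGen u gen),
    PySem.List.foldl_append_singleton_eq_map (f := fun gen => bGen u gen),
    List.nil_append, List.nil_append, List.map_map]
  apply List.map_congr_left
  intro gen _
  simp only [Function.comp_apply]
  rw [core, PySem.List.len_eq, bGen_eq]
  exact pad_eq (bBits u gen) u.length
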